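-- pv_equiv track=rewrite | github.com/mrbartrns/algorithm-and-structure | programmers/lv4_review/t1.py | solution
-- ===== SOURCE A (Python) =====
-- def solution(land, P, Q):
--     tot = 0
--     arr = []
--     for i in range(len(land)):
--         for j in range(len(land)):
--             arr.append(land[i][j])
--             tot += land[i][j]
--     arr.sort()
--     s = (tot - arr[0] * len(arr)) * Q
--     answer = s
--     for i in range(1, len(arr)):
--         up = (arr[i] - arr[i - 1]) * i * P
--         down = (arr[i] - arr[i - 1]) * (len(arr) - i) * Q
--         s += up - down
--         answer = min(answer, s)
--
--     return answer
-- ===== SOURCE B (Python) =====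
-- def solution(land, P, Q):
--     n = len(land)
--     arr = sorted(land[i][j] for i in range(n) for j in range(n))
--     m = n * n
--     tot = sum(arr)
--     costs = []
--     pre = 0
--     for i in range(m):
--         h = arr[i]
--         costs.append(P * (i * h - pre) + Q * ((tot - pre) - (m - i) * h))
--         pre += h
--     return min(costs)
-- ===== Notes on version B (the rewrite author's own statement) =====
-- stated objective: alternative
-- what changed: B replaces A's delta-accumulator (which updates a running cost by (arr[i]-arr[i-1]) increments while tracking the min) with a prefix-sum formulation that computes each candidate level's cost independently by a closed formula P*(i*h-pre)+Q*((tot-pre)-(m-i)*h) and takes min over the list of costs.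
import Mathlib
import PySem

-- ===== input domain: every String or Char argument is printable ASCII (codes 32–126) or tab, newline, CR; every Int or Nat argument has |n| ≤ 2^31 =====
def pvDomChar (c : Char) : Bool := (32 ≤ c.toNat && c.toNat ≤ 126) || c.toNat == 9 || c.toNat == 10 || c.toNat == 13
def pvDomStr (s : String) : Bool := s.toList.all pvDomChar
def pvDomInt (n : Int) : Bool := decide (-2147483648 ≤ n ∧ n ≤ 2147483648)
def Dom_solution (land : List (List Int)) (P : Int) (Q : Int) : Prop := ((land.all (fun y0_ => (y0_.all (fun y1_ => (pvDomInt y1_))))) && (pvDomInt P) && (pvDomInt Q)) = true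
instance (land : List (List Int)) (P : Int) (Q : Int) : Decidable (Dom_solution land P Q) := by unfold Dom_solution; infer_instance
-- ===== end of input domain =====

-- B computes each candidate cost independently from a running prefix sum (closed formula per level)
-- and takes min of the list, instead of A's delta accumulator updating a running cost.

-- ===== PORT A =====
def solution (land : List (List Int)) (P : Int) (Q : Int) : Int :=
  let n : Int := land.length
  let st := (PySem.List.pyRange 0 n 1).foldl (fun (s : Int × List Int) i =>
      (PySem.List.pyRange 0 n 1).foldl (fun (s : Int × List Int) j =>
        let v := PySem.List.pyGetD (PySem.List.pyGetD land i []) j 0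
        (s.1 + v, s.2 ++ [v])) s) (0, [])
  let tot := st.1
  let arr := PySem.List.sorted st.2 (fun x => x) false
  let m : Int := arr.length
  let s0 := (tot - PySem.List.pyGetD arr 0 0 * m) * Q
  let res := (PySem.List.pyRange 1 m 1).foldl (fun (p : Int × Int) i =>
      let d := PySem.List.pyGetD arr i 0 - PySem.List.pyGetD arr (i - 1) 0
      let up := d * i * P
      let down := d * (m - i) * Q
      let s := p.1 + (up - down)
      (s, min p.2 s)) (s0, s0)
  res.2

-- ===== PORT B =====
def solution_alt (land : List (List Int)) (P : Int) (Q : Int) : Int :=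
  let n : Int := land.length
  let arr := PySem.List.sorted ((PySem.List.pyRange 0 n 1).flatMap (fun i =>
      (PySem.List.pyRange 0 n 1).map (fun j =>
        PySem.List.pyGetD (PySem.List.pyGetD land i []) j 0))) (fun x => x) false
  let m : Int := n * n
  let tot := arr.sum
  let st := (PySem.List.pyRange 0 m 1).foldl (fun (p : Int × List Int) i =>
      let h := PySem.List.pyGetD arr i 0
      (p.1 + h, p.2 ++ [P * (i * h - p.1) + Q * ((tot - p.1) - (m - i) * h)])) (0, ([] : List Int))
  (PySem.List.min? st.2 (fun x => x)).getD 0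

-- ===== PRECONDITION & SPEC =====
-- Pre_ excludes exactly the inputs on which A raises IndexError: empty land (arr[0]) and
-- grids with a row shorter than len(land) (land[i][j]).
def Pre_solution (land : List (List Int)) (P : Int) (Q : Int) : Prop :=
  land ≠ [] ∧ ∀ row ∈ land, land.length ≤ row.length
instance (land : List (List Int)) (P : Int) (Q : Int) : Decidable (Pre_solution land P Q) := by
  unfold Pre_solution; infer_instance

def pvWitness_solution : List (List Int) × Int × Int := ([[1, 2], [3, 4]], 1, 2)

def Spec_solution (land : List (List Int)) (P : Int) (Q : Int) (out : Int) : Prop := out = solution_alt land P Q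
instance (land : List (List Int)) (P : Int) (Q : Int) (out : Int) : Decidable (Spec_solution land P Q out) := by unfold Spec_solution; infer_instance

-- ===== CLAIM (what is proved, stated in full; the proofs are below) =====
def Claim_equal_solution : Prop := ∀ (land : List (List Int)) (P : Int) (Q : Int), Dom_solution land P Q → Pre_solution land P Q → Spec_solution land P Q (solution land P Q)

-- ===== LEMMAS AND PROOFS =====

def preSum (a : List Int) (i : Int) : Int := (a.take i.toNat).sum
theorem preSum_succ (a : List Int) (k : Nat) (hk : k < a.length) :
    preSum a ((k : Int) + 1) = preSum a k + PySem.List.pyGetD a k 0 := by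
  unfold preSum
  have h1 : ((k : Int) + 1).toNat = k + 1 := by omega
  have h2 : ((k : Int)).toNat = k := by omega
  rw [h1, h2, List.sum_take_succ a k hk]
  simp [List.getD, List.getElem?_eq_getElem hk]
def fcost (a : List Int) (m tot P Q : Int) (i : Int) : Int :=
  P * (i * PySem.List.pyGetD a i 0 - preSum a i) +
  Q * ((tot - preSum a i) - (m - i) * PySem.List.pyGetD a i 0)
theorem fcost_zero (a : List Int) (m tot P Q : Int) :
    fcost a m tot P Q 0 = (tot - PySem.List.pyGetD a 0 0 * m) * Q := by
  unfold fcost preSum; norm_num; ring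
theorem fcost_step (a : List Int) (m tot P Q : Int) (k : Nat) (h1 : 1 ≤ k) (hk : k < a.length) :
    fcost a m tot P Q k = fcost a m tot P Q ((k : Int) - 1) +
      ((PySem.List.pyGetD a k 0 - PySem.List.pyGetD a ((k : Int) - 1) 0) * k * P -
       (PySem.List.pyGetD a k 0 - PySem.List.pyGetD a ((k : Int) - 1) 0) * (m - k) * Q) := by
  have hcast : ((k - 1 : Nat) : Int) = (k : Int) - 1 := by omega
  have hpre : preSum a ((k : Int)) = preSum a ((k : Int) - 1) + PySem.List.pyGetD a ((k : Int) - 1) 0 := by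
    have h := preSum_succ a (k - 1) (by omega)
    rw [hcast] at h
    have : (k : Int) - 1 + 1 = (k : Int) := by ring
    rwa [this] at h
  unfold fcost
  rw [hpre]
  ring
theorem B_loop (a : List Int) (m tot P Q : Int) (k : Nat) (hk : k ≤ a.length) :
    (PySem.List.pyRange 0 (k : Int) 1).foldl (fun (p : Int × List Int) i =>
      (p.1 + PySem.List.pyGetD a i 0, p.2 ++ [P * (i * PySem.List.pyGetD a i 0 - p.1) +
        Q * ((tot - p.1) - (m - i) * PySem.List.pyGetD a i 0)])) (0, ([] : List Int))
    = (preSum a k, (PySem.List.pyRange 0 (k : Int) 1).map (fcost a m tot P Q)) := by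
  induction k with
  | zero => simp [PySem.List.pyRange_one_eq_nil, preSum]
  | succ k ih =>
    have hle : k ≤ a.length := by omega
    have hsplit : PySem.List.pyRange 0 ((k : Int) + 1) 1 =
        PySem.List.pyRange 0 (k : Int) 1 ++ [(k : Int)] :=
      PySem.List.pyRange_one_succ_right (by omega)
    push_cast
    rw [hsplit, List.foldl_append, List.map_append, ih hle]
    rw [preSum_succ a k (by omega)]
    simp [fcost]
theorem A_loop (a : List Int) (m tot P Q : Int) (k : Nat) (h1 : 1 ≤ k) (hk : k ≤ a.length) :
    (PySem.List.pyRange 1 (k : Int) 1).foldl (fun (p : Int × Int) i =>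
      (p.1 + ((PySem.List.pyGetD a i 0 - PySem.List.pyGetD a (i - 1) 0) * i * P -
         (PySem.List.pyGetD a i 0 - PySem.List.pyGetD a (i - 1) 0) * (m - i) * Q),
       min p.2 (p.1 + ((PySem.List.pyGetD a i 0 - PySem.List.pyGetD a (i - 1) 0) * i * P -
         (PySem.List.pyGetD a i 0 - PySem.List.pyGetD a (i - 1) 0) * (m - i) * Q)))) (fcost a m tot P Q 0, fcost a m tot P Q 0)
    = (fcost a m tot P Q ((k : Int) - 1),
       ((PySem.List.pyRange 1 (k : Int) 1).map (fcost a m tot P Q)).foldl min (fcost a m tot P Q 0)) := by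
  induction k with
  | zero => omega
  | succ k ih =>
    rcases Nat.eq_zero_or_pos k with h0 | hpos
    · subst h0; norm_num [PySem.List.pyRange_one_eq_nil]
    · have hsplit : PySem.List.pyRange 1 ((k : Int) + 1) 1 =
          PySem.List.pyRange 1 (k : Int) 1 ++ [(k : Int)] :=
        PySem.List.pyRange_one_succ_right (by omega)
      have hstep := fcost_step a m tot P Q k hpos (by omega)
      have hk1 : ((k : Int) + 1 - 1) = (k : Int) := by ring
      push_cast
      rw [hsplit, List.foldl_append, List.map_append, ih hpos (by omega), hk1,
        List.foldl_append]
      simp only [List.foldl_cons, List.foldl_nil, List.map_cons, List.map_nil]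
      rw [← hstep]
theorem pair_collect (f : Int → Int) (l : List Int) (init : Int × List Int) :
    l.foldl (fun s j =>
      let v := f j
      (s.1 + v, s.2 ++ [v])) init = (init.1 + (l.map f).sum, init.2 ++ l.map f) := by
  induction l generalizing init with
  | nil => simp
  | cons x t ih => simp [ih]; ring

theorem pair_collect2 (F : Int → List Int) (l : List Int) (init : Int × List Int) :
    l.foldl (fun s i => (s.1 + (F i).sum, s.2 ++ F i)) init
      = (init.1 + (l.flatMap F).sum, init.2 ++ l.flatMap F) := by
  induction l generalizing init with
  | nil => simp
  | cons x t ih => simp [ih]; ring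
theorem solution_eq_alt (land : List (List Int)) (P Q : Int) (hne : land ≠ [])
    (hrow : ∀ row ∈ land, land.length ≤ row.length) :
    solution land P Q = solution_alt land P Q := by
  unfold solution solution_alt
  simp only [pair_collect, pair_collect2, List.nil_append, zero_add]
  set L := land.length with hLdef
  set flat := List.flatMap
      (fun i => List.map (fun j => PySem.List.pyGetD (PySem.List.pyGetD land i []) j 0)
        (PySem.List.pyRange 0 (L : Int) 1)) (PySem.List.pyRange 0 (L : Int) 1) with hflatdef
  set a := PySem.List.sorted flat (fun x => x) false with hadef
  have hL : 1 ≤ L := by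
    cases land with
    | nil => exact absurd rfl hne
    | cons x t => simp [hLdef]
  have hflatlen : flat.length = L * L := by
    simp [hflatdef, List.length_flatMap, PySem.List.length_pyRange_one]
  have halen : a.length = L * L := by
    rw [hadef, PySem.List.length_sorted, hflatlen]
  have hsum : a.sum = flat.sum := (PySem.List.sorted_perm flat _ _).sum_eq
  have hm : ((a.length : Int)) = ((L * L : Nat) : Int) := by rw [halen]
  have hm2 : ((L : Int) * (L : Int)) = ((L * L : Nat) : Int) := by push_cast; ring
  rw [hm, hm2, hsum]
  have hk2 : 1 ≤ L * L := by nlinarith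
  have hbl := B_loop a ((L*L : Nat) : Int) flat.sum P Q (L*L) (le_of_eq halen.symm)
  have hal := A_loop a ((L*L : Nat) : Int) flat.sum P Q (L*L) hk2 (le_of_eq halen.symm)
  rw [← fcost_zero a ((L*L : Nat) : Int) flat.sum P Q]
  rw [hal, hbl]
  have hpos : (0:Int) < ((L*L : Nat) : Int) := by exact_mod_cast hk2
  rw [PySem.List.pyRange_one_cons hpos]
  norm_num
  rw [PySem.List.min?_id_cons]
  rfl

-- ===== VERDICT (by name: the statement is the Claim_ definition above) =====
theorem solution_spec : Claim_equal_solution := by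
  intro land P Q _ hpre
  show solution land P Q = solution_alt land P Q
  exact solution_eq_alt land P Q hpre.1 hpre.2
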